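-- pv_equiv track=rewrite | github.com/FrostyAceHook/ratlab | ratlab/util.py | ilog10
-- ===== SOURCE A (Python) =====
-- def tname(t, namespaced=False, quoted=True):
--     """
--     Returns a string of the given type, surrounded in single quotes. If the type
--     has the `_tname` property that will be used for the name, otherwise it will
--     be constructed from (optionally) the module and `__name__`.
--     """
--     if not isinstance(t, type):
--         raise TypeError(f"expected type, got {objtname(t)}")
--     finish = lambda s: f"'{s}'" if quoted else s
--     if hasattr(t, "_tname"):
--         return finish(t._tname)
--     name = t.__name__
--     if not namespaced:
--         return finish(name)
--     namespace = t.__module__ + "."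
--     namespace *= namespace not in {"__main__", "builtins"}
--     return finish(namespace + name)
--
-- def objtname(obj, namespaced=False, quoted=True):
--     """
--     Alias for 'tname(type(obj))'.
--     """
--     return tname(type(obj), namespaced=namespaced, quoted=quoted)
--
-- def ilog10(x):
--     """
--     floor(log10(x)), where x is a strictly positive integer.
--     """
--     if not isinstance(x, int):
--         raise TypeError(f"expected integer, got {objtname(x)}")
--     if x <= 0:
--         raise ValueError(f"expected 'x > 0', got: {x}")
--     if x == 1:
--         return 0
--
--     # Find approx log10 = log2(x) / log2(10)
--     #                  ~= log2(x) * (1233 / 2^12)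
--     ilog2 = x.bit_length() - 1
--     ilog10 = ((ilog2 - 1) * 1233) >> 12 # c my beloved.
--
--     # Find the exact ilog10.
--     lower = 10 ** ilog10
--     while lower > x:
--         ilog10 -= 1
--         lower //= 10
--     upper = lower * 10
--     while upper <= x:
--         ilog10 += 1
--         upper *= 10
--     return ilog10
-- ===== SOURCE B (Python) =====
-- def ilog10(x):
--     """
--     floor(log10(x)), where x is a strictly positive integer.
--     """
--     if not isinstance(x, int):
--         raise TypeError(f"expected integer, got '{type(x).__name__}'")
--     if x <= 0:
--         raise ValueError(f"expected 'x > 0', got: {x}")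
--     d = 0
--     while x >= 10:
--         x //= 10
--         d += 1
--     return d
-- ===== Notes on version B (the rewrite author's own statement) =====
-- stated objective: simpler
-- what changed: Replaces the bit_length-based log2 estimate (1233/4096 approximation) and its two power-of-10 correction loops with one plain loop that counts how many times x can be floor-divided by 10.
import Mathlib
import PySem

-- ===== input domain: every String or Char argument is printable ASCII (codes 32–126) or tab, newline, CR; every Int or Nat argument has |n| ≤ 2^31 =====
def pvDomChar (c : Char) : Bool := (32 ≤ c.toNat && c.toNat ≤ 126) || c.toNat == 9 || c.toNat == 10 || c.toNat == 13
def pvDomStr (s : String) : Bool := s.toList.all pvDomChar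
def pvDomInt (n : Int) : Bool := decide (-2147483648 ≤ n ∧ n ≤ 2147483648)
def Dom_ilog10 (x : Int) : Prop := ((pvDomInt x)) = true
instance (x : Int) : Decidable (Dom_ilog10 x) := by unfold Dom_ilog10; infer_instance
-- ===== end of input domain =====

-- B replaces A's bit_length-based estimate and two correction loops by a single
-- divide-by-10 counting loop; simpler, same asymptotic cost.


-- ===== PORT A =====
-- 'while lower > x: ilog10 -= 1; lower //= 10'
-- (fuel only makes the loop total; est.toNat + 1 steps always suffice, proved in lowerLoop_spec)
def ilog10LowerLoop (x : Int) (fuel : Nat) (i lower : Int) : Int × Int :=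
  match fuel with
  | 0 => (i, lower)
  | fuel + 1 =>
      if x < lower then ilog10LowerLoop x fuel (i - 1) (PySem.Int.floordiv lower 10)
      else (i, lower)

-- 'while upper <= x: ilog10 += 1; upper *= 10'
-- (fuel only makes the loop total; x.toNat + 1 steps always suffice, proved in upperLoop_spec)
def ilog10UpperLoop (x : Int) (fuel : Nat) (i upper : Int) : Int :=
  match fuel with
  | 0 => i
  | fuel + 1 =>
      if upper ≤ x then ilog10UpperLoop x fuel (i + 1) (upper * 10)
      else i

def ilog10 (x : Int) : Int :=
  if x ≤ 0 then 0        -- Python raises ValueError here; excluded by Pre_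
  else if x = 1 then 0
  else
    -- ilog2 = x.bit_length() - 1;  ilog10 = ((ilog2 - 1) * 1233) >> 12  ('>> 12' = floor-div by 4096, exact)
    let ilog2 : Int := (PySem.Int.bitLength x : Int) - 1
    let est : Int := PySem.Int.floordiv ((ilog2 - 1) * 1233) 4096
    -- lower = 10 ** est; est ≥ 0 on this path (x ≥ 2), so the Nat exponent is exact
    let lower : Int := (10:Int) ^ est.toNat
    let p := ilog10LowerLoop x (est.toNat + 1) est lower
    ilog10UpperLoop x (x.toNat + 1) p.1 (p.2 * 10)

-- ===== PORT B =====
-- 'while x >= 10: x //= 10; d += 1'  (fuel x.toNat always suffices, proved in altLoop_spec)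
def ilog10AltLoop (fuel : Nat) (x d : Int) : Int :=
  match fuel with
  | 0 => d
  | fuel + 1 =>
      if 10 ≤ x then ilog10AltLoop fuel (PySem.Int.floordiv x 10) (d + 1)
      else d

def ilog10_alt (x : Int) : Int :=
  if x ≤ 0 then 0        -- Python raises ValueError here; excluded by Pre_
  else ilog10AltLoop x.toNat x 0

-- ===== PRECONDITION & SPEC =====
-- A raises (TypeError is impossible for an Int argument; ValueError for x ≤ 0) outside x ≥ 1.
def Pre_ilog10 (x : Int) : Prop := 1 ≤ x
instance (x : Int) : Decidable (Pre_ilog10 x) := by unfold Pre_ilog10; infer_instance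
def pvWitness_ilog10 : Int := (42)

def Spec_ilog10 (x : Int) (out : Int) : Prop := out = ilog10_alt x
instance (x : Int) (out : Int) : Decidable (Spec_ilog10 x out) := by unfold Spec_ilog10; infer_instance

-- ===== CLAIM (what is proved, stated in full; the proofs are below) =====
def Claim_equal_ilog10 : Prop := ∀ (x : Int), Dom_ilog10 x → Pre_ilog10 x → Spec_ilog10 x (ilog10 x)

-- ===== LEMMAS AND PROOFS =====
lemma pow10_pos (k : Nat) : (1:Int) ≤ 10 ^ k := one_le_pow₀ (by norm_num)

lemma floordiv_pow10_succ (k : Nat) : PySem.Int.floordiv ((10:Int) ^ (k + 1)) 10 = 10 ^ k := by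
  rw [PySem.Int.floordiv_eq_ediv_of_pos (by norm_num), pow_succ]
  exact Int.mul_ediv_cancel _ (by norm_num)

lemma log10_unique (x : Int) (a b : Nat)
    (h1 : (10:Int) ^ a ≤ x) (h2 : x < 10 ^ (a + 1))
    (h3 : (10:Int) ^ b ≤ x) (h4 : x < 10 ^ (b + 1)) : a = b := by
  by_contra hne
  rcases Nat.lt_or_ge a b with hab | hab
  · have : (10:Int) ^ (a + 1) ≤ 10 ^ b := pow_le_pow_right₀ (by norm_num) hab
    omega
  · have hba : b < a := lt_of_le_of_ne hab (by omega)
    have : (10:Int) ^ (b + 1) ≤ 10 ^ a := pow_le_pow_right₀ (by norm_num) hba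
    omega

lemma altLoop_spec (fuel : Nat) : ∀ (x d : Int), 1 ≤ x → 0 ≤ d → x.toNat ≤ fuel →
    d ≤ ilog10AltLoop fuel x d ∧
    (10:Int) ^ (ilog10AltLoop fuel x d - d).toNat ≤ x ∧
    x < 10 ^ ((ilog10AltLoop fuel x d - d).toNat + 1) := by
  induction fuel with
  | zero => intro x d hx hd hf; omega
  | succ fuel ih =>
      intro x d hx hd hf
      rw [ilog10AltLoop]
      by_cases h : (10:Int) ≤ x
      · rw [if_pos h]
        have hdiv : PySem.Int.floordiv x 10 = x / 10 :=
          PySem.Int.floordiv_eq_ediv_of_pos (by norm_num)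
        have hb : 10 * (x / 10) ≤ x ∧ x < 10 * (x / 10) + 10 ∧ 1 ≤ x / 10 ∧
            (x / 10).toNat ≤ fuel := by omega
        obtain ⟨le1, lo1, hi1⟩ := ih (PySem.Int.floordiv x 10) (d + 1)
          (by omega) (by omega) (by omega)
        set r := ilog10AltLoop fuel (PySem.Int.floordiv x 10) (d + 1) with hr
        have hk : (r - d).toNat = (r - (d + 1)).toNat + 1 := by omega
        rw [hdiv] at lo1 hi1
        refine ⟨by omega, ?_, ?_⟩
        · rw [hk, pow_succ]; nlinarith [lo1, hb.1]
        · rw [hk]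
          have he : (10:Int) ^ ((r - (d + 1)).toNat + 1 + 1) =
              10 ^ ((r - (d + 1)).toNat + 1) * 10 := by ring
          rw [he]; nlinarith [hi1, hb.2.1]
      · rw [if_neg h]
        refine ⟨le_refl d, ?_, ?_⟩ <;> simp <;> omega

lemma lowerLoop_spec (fuel : Nat) : ∀ (x i lower : Int), 2 ≤ x → 0 ≤ i →
    lower = (10:Int) ^ i.toNat → i.toNat < fuel →
    0 ≤ (ilog10LowerLoop x fuel i lower).1 ∧
    (ilog10LowerLoop x fuel i lower).2 = (10:Int) ^ ((ilog10LowerLoop x fuel i lower).1).toNat ∧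
    (ilog10LowerLoop x fuel i lower).2 ≤ x := by
  induction fuel with
  | zero => intro x i lower hx hi hil hf; omega
  | succ fuel ih =>
      intro x i lower hx hi hil hf
      rw [ilog10LowerLoop]
      by_cases h : x < lower
      · rw [if_pos h]
        subst hil
        have hipos : 1 ≤ i.toNat := by
          by_contra hc
          have h0 : i.toNat = 0 := by omega
          rw [h0] at h; norm_num at h; omega
        have hm : i.toNat = (i.toNat - 1) + 1 := by omega
        have hfd : PySem.Int.floordiv ((10:Int) ^ i.toNat) 10 = 10 ^ (i - 1).toNat := by
          rw [hm, floordiv_pow10_succ]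
          congr 1
          omega
        exact ih x (i - 1) _ hx (by omega) hfd (by omega)
      · rw [if_neg h]
        exact ⟨hi, hil, by omega⟩

lemma upperLoop_spec (fuel : Nat) : ∀ (x i upper : Int), 1 ≤ upper → 0 ≤ i →
    upper = (10:Int) ^ (i.toNat + 1) → (10:Int) ^ i.toNat ≤ x →
    (x + 1 - upper).toNat ≤ fuel →
    0 ≤ ilog10UpperLoop x fuel i upper ∧
    (10:Int) ^ (ilog10UpperLoop x fuel i upper).toNat ≤ x ∧
    x < 10 ^ ((ilog10UpperLoop x fuel i upper).toNat + 1) := by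
  induction fuel with
  | zero =>
      intro x i upper hu hi hup hlo hf
      rw [ilog10UpperLoop]
      exact ⟨hi, hlo, by rw [← hup]; omega⟩
  | succ fuel ih =>
      intro x i upper hu hi hup hlo hf
      rw [ilog10UpperLoop]
      by_cases h : upper ≤ x
      · rw [if_pos h]
        have h1 : (i + 1).toNat = i.toNat + 1 := by omega
        refine ih x (i + 1) (upper * 10) (by omega) (by omega) ?_ ?_ (by omega)
        · rw [hup, h1]; ring
        · rw [h1, ← hup]; exact h
      · rw [if_neg h]
        exact ⟨hi, hlo, by rw [← hup]; omega⟩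

lemma bitLength_ge_two (x : Int) (hx : 2 ≤ x) : 2 ≤ PySem.Int.bitLength x := by
  have h1 := PySem.Int.lt_two_pow_bitLength x
  by_contra hc
  interval_cases h : PySem.Int.bitLength x <;> norm_num at h1 <;> omega

theorem ilog10_char_of_two_le (x : Int) (hx : 2 ≤ x) :
    0 ≤ ilog10 x ∧ (10:Int) ^ (ilog10 x).toNat ≤ x ∧ x < 10 ^ ((ilog10 x).toNat + 1) := by
  rw [ilog10]
  rw [if_neg (by omega), if_neg (by omega)]
  have hbl := bitLength_ge_two x hx
  set ilog2 : Int := (PySem.Int.bitLength x : Int) - 1 with hilog2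
  set est : Int := PySem.Int.floordiv ((ilog2 - 1) * 1233) 4096 with hest
  have hest0 : 0 ≤ est := by
    rw [hest, PySem.Int.floordiv_eq_ediv_of_pos (by norm_num)]
    exact Int.ediv_nonneg (by nlinarith [hbl]) (by norm_num)
  set p := ilog10LowerLoop x (est.toNat + 1) est ((10:Int) ^ est.toNat) with hp
  obtain ⟨hp1, hp2, hp3⟩ :=
    lowerLoop_spec (est.toNat + 1) x est ((10:Int) ^ est.toNat) hx hest0 rfl (by omega)
  rw [← hp] at hp1 hp2 hp3
  have hpow := pow10_pos p.1.toNat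
  rw [← hp2] at hpow
  refine upperLoop_spec (x.toNat + 1) x p.1 (p.2 * 10) (by omega) hp1 ?_ ?_ (by omega)
  · rw [hp2]; ring
  · rw [← hp2]; exact hp3

-- ===== VERDICT (by name: the statement is the Claim_ definition above) =====
theorem ilog10_spec : Claim_equal_ilog10 := by
  unfold Claim_equal_ilog10
  intro x _ hpre
  unfold Pre_ilog10 at hpre
  unfold Spec_ilog10
  rcases eq_or_lt_of_le hpre with h1 | h2
  · rw [← h1]
    decide
  · have hx : 2 ≤ x := h2
    obtain ⟨ha0, ha1, ha2⟩ := ilog10_char_of_two_le x hx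
    have hbc := altLoop_spec x.toNat x 0 (by omega) (by omega) (by omega)
    obtain ⟨hb0, hb1, hb2⟩ := hbc
    have hbeq : ilog10_alt x = ilog10AltLoop x.toNat x 0 := by
      rw [ilog10_alt, if_neg (by omega)]
    rw [hbeq]
    have := log10_unique x (ilog10 x).toNat (ilog10AltLoop x.toNat x 0 - 0).toNat ha1 ha2 hb1 hb2
    omega
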